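-- pv_equiv track=rewrite | github.com/jdglaser/mathesis | GoogleSearchVolume.py | time_list
-- ===== SOURCE A (Python) =====
-- class InvalidMonthorYear(Exception):
--     pass
--
-- def time_list(year,month,year_back):
--     '''
--     Creates a list of strings 1 month apart going back a
--     number of years, set by year_back, form the start year
--     and month specified
--     '''
--     time_list = []
--     try:
--         month = int(month)
--         year = int(year)
--     except ValueError:
--         raise InvalidMonthorYear ("Error: Month and Year must be either an int or a string that is convertable to an int")
--
--     while True:
--         if month >= 1:
--             month_str = str(month)
--             if len(month_str) > 1:
--                 time_str = "{}-{}-01".format(year,month_str)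
--                 time_list.append(time_str)
--             else:
--                 time_str = "{}-0{}-01".format(year,month_str)
--                 time_list.append(time_str)
--             month -= 1
--         else:
--             break
--
--     year_num = int(year) - 1
--
--     year_list = []
--     for i in range(year_back + 1):
--         year_list.append(year_num - i)
--
--     for y in year_list:
--         for m in range(12,0,-1):
--             month_str = str(m)
--             if len(month_str) > 1:
--                 month_time_str = "{}-01".format(month_str)
--             else:
--                 month_time_str = "0{}-01".format(month_str)
--             final_time_str = "{}-{}".format(y,month_time_str)
--             time_list.append(final_time_str)
--     return time_list
-- ===== SOURCE B (Python) =====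
-- def time_list(year, month, year_back):
--     '''
--     Creates a list of strings 1 month apart going back a
--     number of years, set by year_back, from the start year
--     and month specified
--     '''
--     month = int(month)
--     year = int(year)
--     last_year = year - 1 - year_back
--     out = []
--     y, m = year, month
--     while True:
--         if m < 1:
--             y, m = y - 1, 12
--             if y < last_year:
--                 break
--         out.append("{}-{:02d}-01".format(y, m))
--         m -= 1
--     return out
-- ===== Notes on version B (the rewrite author's own statement) =====
-- stated objective: simpler
-- what changed: Replaces A's partial while-loop plus year-list construction plus nested year-by-month double loop by one linear walk of a (year, month) cursor with month rollover, stopping when the year rolls past the last year to cover.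
import Mathlib
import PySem

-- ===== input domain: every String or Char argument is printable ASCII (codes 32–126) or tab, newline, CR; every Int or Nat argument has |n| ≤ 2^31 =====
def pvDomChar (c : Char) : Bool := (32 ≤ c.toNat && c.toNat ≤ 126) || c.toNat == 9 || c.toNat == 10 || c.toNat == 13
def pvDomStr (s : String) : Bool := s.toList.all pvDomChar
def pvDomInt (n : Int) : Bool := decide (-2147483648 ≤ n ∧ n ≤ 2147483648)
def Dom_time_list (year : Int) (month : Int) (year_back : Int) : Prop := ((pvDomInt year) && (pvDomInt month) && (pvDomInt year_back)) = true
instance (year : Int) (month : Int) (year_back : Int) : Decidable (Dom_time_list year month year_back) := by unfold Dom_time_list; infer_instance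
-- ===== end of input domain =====

-- B replaces A's partial while-loop, year-list construction and nested year×month double loop by one
-- linear walk of a (year, month) cursor with month rollover and a stop-year check (objective: simpler).

-- ===== PORT A =====
-- the 'while True: if month >= 1 … else break' loop (int(...) on an Int argument is the identity)
def tlA_while (year : Int) (month : Int) (acc : List String) : List String :=
  if _h : month ≥ 1 then
    let month_str := PySem.Int.toStr month
    let time_str :=
      if PySem.Str.len month_str > 1 then
        PySem.Int.toStr year ++ "-" ++ month_str ++ "-01"
      else
        PySem.Int.toStr year ++ "-0" ++ month_str ++ "-01"
    tlA_while year (month - 1) (acc ++ [time_str])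
  else acc
termination_by month.toNat
decreasing_by omega

def time_list (year : Int) (month : Int) (year_back : Int) : List String :=
  let tl := tlA_while year month []
  let year_num := year - 1
  let year_list := (PySem.List.pyRange 0 (year_back + 1) 1).foldl (fun acc i => acc ++ [year_num - i]) []
  year_list.foldl (fun acc y =>
    (PySem.List.pyRange 12 0 (-1)).foldl (fun acc2 m =>
      let month_str := PySem.Int.toStr m
      let month_time_str :=
        if PySem.Str.len month_str > 1 then month_str ++ "-01"
        else "0" ++ month_str ++ "-01"
      acc2 ++ [PySem.Int.toStr y ++ "-" ++ month_time_str]) acc) tl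

-- ===== PORT B =====
-- '{:02d}'.format(m), ported by hand: exact for m ≥ 0 (every m this loop formats is ≥ 1)
def pvPad02 (s : String) : String := if PySem.Str.len s < 2 then "0" ++ s else s

-- the 'while True' cursor walk of Source B: state (y, m, out); rollover when m < 1, break past last_year
def tlB_loop (L : Int) (y : Int) (m : Int) (out : List String) : List String :=
  if _h1 : m < 1 then
    if _h2 : y - 1 < L then out
    else tlB_loop L (y - 1) 11
      (out ++ [PySem.Int.toStr (y - 1) ++ "-" ++ pvPad02 (PySem.Int.toStr 12) ++ "-01"])
  else tlB_loop L y (m - 1)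
    (out ++ [PySem.Int.toStr y ++ "-" ++ pvPad02 (PySem.Int.toStr m) ++ "-01"])
termination_by (m.toNat + 12 * (y - L + 1).toNat)
decreasing_by all_goals omega

def time_list_alt (year : Int) (month : Int) (year_back : Int) : List String :=
  tlB_loop (year - 1 - year_back) year month []

-- ===== PRECONDITION & SPEC =====
def Spec_time_list (year : Int) (month : Int) (year_back : Int) (out : List String) : Prop := out = time_list_alt year month year_back
instance (year : Int) (month : Int) (year_back : Int) (out : List String) : Decidable (Spec_time_list year month year_back out) := by unfold Spec_time_list; infer_instance

-- ===== CLAIM (what is proved, stated in full; the proofs are below) =====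
def Claim_equal_time_list : Prop := ∀ (year : Int) (month : Int) (year_back : Int), Dom_time_list year month year_back → Spec_time_list year month year_back (time_list year month year_back)

-- ===== LEMMAS AND PROOFS =====

-- one "Y-MM-01" entry, in B's shape
def pvEntry (y m : Int) : String := PySem.Int.toStr y ++ "-" ++ pvPad02 (PySem.Int.toStr m) ++ "-01"

-- the entries for months m, m-1, …, 1
def pvPartial (y : Int) (m : Int) : List String :=
  if h : m ≥ 1 then pvEntry y m :: pvPartial y (m - 1) else []
termination_by m.toNat
decreasing_by omega

-- the blocks for years y, y-1, …, y-K+1 (12 entries each)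
def pvBlocks (y : Int) : Nat → List String
  | 0 => []
  | K + 1 => pvPartial y 12 ++ pvBlocks (y - 1) K

theorem pvPartial_pos (y m : Int) (h : m ≥ 1) :
    pvPartial y m = pvEntry y m :: pvPartial y (m - 1) := by
  rw [pvPartial, dif_pos h]

theorem pvPartial_neg (y m : Int) (h : ¬ m ≥ 1) : pvPartial y m = [] := by
  rw [pvPartial, dif_neg h]

theorem pvEntry_eq_A (y m : Int) :
    (if PySem.Str.len (PySem.Int.toStr m) > 1 then
        PySem.Int.toStr y ++ "-" ++ PySem.Int.toStr m ++ "-01"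
      else PySem.Int.toStr y ++ "-0" ++ PySem.Int.toStr m ++ "-01")
      = pvEntry y m := by
  unfold pvEntry pvPad02
  by_cases h : PySem.Str.len (PySem.Int.toStr m) > 1
  · rw [if_pos h, if_neg (by omega)]
  · rw [if_neg h, if_pos (by omega)]
    rw [show ("-0" : String) = "-" ++ "0" from rfl]
    simp only [String.append_assoc]

theorem tlA_while_eq (year month : Int) (acc : List String) :
    tlA_while year month acc = acc ++ pvPartial year month := by
  generalize hk : month.toNat = k
  induction k generalizing month acc with
  | zero =>
    rw [tlA_while, dif_neg (by omega), pvPartial_neg _ _ (by omega)]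
    simp
  | succ k ih =>
    have h : month ≥ 1 := by omega
    rw [tlA_while, dif_pos h, ih _ _ (by omega), pvPartial_pos _ _ h]
    simp only [pvEntry_eq_A year month]
    simp

-- B's loop appends to 'out' only at the end
theorem tlB_loop_out (L y m : Int) (out : List String) :
    tlB_loop L y m out = out ++ tlB_loop L y m [] := by
  generalize hk : m.toNat + 12 * (y - L + 1).toNat = k
  induction k using Nat.strong_induction_on generalizing y m out with
  | _ k ih =>
  by_cases h1 : m < 1
  · by_cases h2 : y - 1 < L
    · rw [tlB_loop, dif_pos h1, dif_pos h2, tlB_loop, dif_pos h1, dif_pos h2]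
      simp
    · rw [tlB_loop, dif_pos h1, dif_neg h2]
      conv_rhs => rw [tlB_loop, dif_pos h1, dif_neg h2]
      rw [ih _ (by omega) _ _ _ rfl, ih _ (by omega) (y - 1) 11 ([] ++ _) rfl]
      simp
  · rw [tlB_loop, dif_neg h1]
    conv_rhs => rw [tlB_loop, dif_neg h1]
    rw [ih _ (by omega) _ _ _ rfl, ih _ (by omega) y (m - 1) ([] ++ _) rfl]
    simp

-- walking months m, m-1, …, 1 of year y, then continuing from the rollover state
theorem tlB_partial (L y m : Int) :
    tlB_loop L y m [] = pvPartial y m ++ tlB_loop L y 0 [] := by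
  generalize hk : m.toNat = k
  induction k generalizing m with
  | zero =>
    have h1 : m < 1 := by omega
    rw [pvPartial_neg _ _ (by omega), tlB_loop, dif_pos h1]
    conv_rhs => rw [tlB_loop, dif_pos (by omega : (0:Int) < 1)]
    simp
  | succ k ih =>
    have h1 : ¬ m < 1 := by omega
    rw [tlB_loop, dif_neg h1, tlB_loop_out, ih (m - 1) (by omega),
        pvPartial_pos y m (by omega)]
    simp only [pvEntry, List.nil_append, List.cons_append]

-- from a rollover state, B emits the full-year blocks down to year L
theorem tlB_years (L y : Int) :
    tlB_loop L y 0 [] = pvBlocks (y - 1) (y - L).toNat := by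
  generalize hk : (y - L).toNat = K
  induction K generalizing y with
  | zero =>
    rw [tlB_loop, dif_pos (by omega : (0:Int) < 1), dif_pos (by omega)]
    rfl
  | succ K ih =>
    rw [tlB_loop, dif_pos (by omega : (0:Int) < 1), dif_neg (by omega : ¬ y - 1 < L),
        tlB_loop_out, tlB_partial, ih (y - 1) (by omega), pvBlocks]
    rw [pvPartial_pos _ 12 (by omega)]
    simp only [pvEntry, List.nil_append, List.cons_append]
    norm_num

theorem alt_eq (year month year_back : Int) :
    time_list_alt year month year_back
      = pvPartial year month ++ pvBlocks (year - 1) (year_back + 1).toNat := by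
  unfold time_list_alt
  rw [tlB_partial, tlB_years]
  have : (year - (year - 1 - year_back)).toNat = (year_back + 1).toNat := by omega
  rw [this]

-- A's inner month loop over range(12, 0, -1) produces exactly one year's block
theorem inner_year (y : Int) (acc : List String) :
    (PySem.List.pyRange 12 0 (-1)).foldl (fun acc2 m =>
      acc2 ++ [PySem.Int.toStr y ++ "-" ++
        (if PySem.Str.len (PySem.Int.toStr m) > 1 then PySem.Int.toStr m ++ "-01"
         else "0" ++ PySem.Int.toStr m ++ "-01")]) acc
      = acc ++ pvPartial y 12 := by
  have hp : ∀ m : Int, 1 ≤ m →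
      PySem.Int.toStr y ++ "-" ++
        (if PySem.Str.len (PySem.Int.toStr m) > 1 then PySem.Int.toStr m ++ "-01"
         else "0" ++ PySem.Int.toStr m ++ "-01") = pvEntry y m := by
    intro m _
    rw [← pvEntry_eq_A y m, show ("-0" : String) = "-" ++ "0" from rfl]
    split_ifs <;> simp only [String.append_assoc]
  rw [PySem.List.foldl_append_singleton_eq_map]
  rw [show PySem.List.pyRange 12 0 (-1) = [12, 11, 10, 9, 8, 7, 6, 5, 4, 3, 2, 1] from by decide]
  simp only [List.map_cons, List.map_nil]
  rw [hp 12 (by omega), hp 11 (by omega), hp 10 (by omega), hp 9 (by omega), hp 8 (by omega),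
      hp 7 (by omega), hp 6 (by omega), hp 5 (by omega), hp 4 (by omega), hp 3 (by omega),
      hp 2 (by omega), hp 1 (by omega)]
  rw [pvPartial_pos _ _ (by omega), pvPartial_pos _ _ (by omega), pvPartial_pos _ _ (by omega),
      pvPartial_pos _ _ (by omega), pvPartial_pos _ _ (by omega), pvPartial_pos _ _ (by omega),
      pvPartial_pos _ _ (by omega), pvPartial_pos _ _ (by omega), pvPartial_pos _ _ (by omega),
      pvPartial_pos _ _ (by omega), pvPartial_pos _ _ (by omega), pvPartial_pos _ _ (by omega),
      pvPartial_neg _ _ (by omega)]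
  norm_num

theorem desc_flatMap (K : Nat) (y : Int) :
    (List.map (fun k : Nat => y - (k : Int)) (List.range K)).flatMap (fun z => pvPartial z 12)
      = pvBlocks y K := by
  induction K generalizing y with
  | zero => simp [pvBlocks]
  | succ K ih =>
    rw [List.range_succ_eq_map, pvBlocks]
    simp only [List.map_cons, List.map_map, List.flatMap_cons]
    rw [show ((fun k : Nat => y - (k : Int)) ∘ Nat.succ) = (fun k : Nat => (y - 1) - (k : Int)) from by
      funext k; simp only [Function.comp_apply, Nat.succ_eq_add_one]; push_cast; ring]
    rw [ih]
    norm_num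

-- ===== VERDICT =====
theorem time_list_spec : Claim_equal_time_list := by
  unfold Claim_equal_time_list Spec_time_list
  intro year month year_back _hdom
  unfold time_list
  simp only [tlA_while_eq]
  rw [PySem.List.foldl_append_singleton_eq_map]
  rw [PySem.List.foldl_congr_mem _ _ (fun acc y => acc ++ pvPartial y 12) _
    (fun acc y _ => inner_year y acc)]
  rw [PySem.List.foldl_append_eq_flatMap]
  rw [PySem.List.pyRange_one, List.map_map]
  rw [show ((fun i => year - 1 - i) ∘ fun k : Nat => (0:Int) + (k:Int))
      = (fun k : Nat => (year - 1) - (k : Int)) from by funext k; simp]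
  rw [show (year_back + 1 - 0 : Int) = year_back + 1 from by ring]
  simp only [List.nil_append]
  rw [desc_flatMap, alt_eq]
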